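-- pv_equiv track=rewrite | github.com/Wewoll/TIC | TP6/Ejercicio2/Ejercicio2.py | esCanalSinRuido
-- ===== SOURCE A (Python) =====
-- def esCanalSinRuido(matriz_canal):
--     res = True
--     num_filas = len(matriz_canal)
--     num_columnas = len(matriz_canal[0])
--
--     for j in range(num_columnas):
--         conteo_no_cero = 0
--         for i in range(num_filas):
--             if matriz_canal[i][j] > 0:
--                 conteo_no_cero += 1
--
--         if conteo_no_cero != 1:
--             res = False
--
--     return res
-- ===== SOURCE B (Python) =====
-- def esCanalSinRuido(matriz_canal):
--     # Different algorithm: collect the column index of every positive entry,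
--     # then the channel is noiseless iff those indices, sorted, are exactly
--     # 0..num_columnas-1 (each column hit exactly once).
--     num_columnas = len(matriz_canal[0])
--     posiciones = [j for fila in matriz_canal
--                     for j in range(num_columnas) if fila[j] > 0]
--     return sorted(posiciones) == list(range(num_columnas))
-- ===== Notes on version B (the rewrite author's own statement) =====
-- stated objective: alternative
-- what changed: Instead of counting positive entries per column and checking each count is 1, B flattens the matrix into the list of column indices of all positive entries and checks that this list, sorted, equals range(num_columnas) (a sort-and-compare permutation test).
import Mathlib
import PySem

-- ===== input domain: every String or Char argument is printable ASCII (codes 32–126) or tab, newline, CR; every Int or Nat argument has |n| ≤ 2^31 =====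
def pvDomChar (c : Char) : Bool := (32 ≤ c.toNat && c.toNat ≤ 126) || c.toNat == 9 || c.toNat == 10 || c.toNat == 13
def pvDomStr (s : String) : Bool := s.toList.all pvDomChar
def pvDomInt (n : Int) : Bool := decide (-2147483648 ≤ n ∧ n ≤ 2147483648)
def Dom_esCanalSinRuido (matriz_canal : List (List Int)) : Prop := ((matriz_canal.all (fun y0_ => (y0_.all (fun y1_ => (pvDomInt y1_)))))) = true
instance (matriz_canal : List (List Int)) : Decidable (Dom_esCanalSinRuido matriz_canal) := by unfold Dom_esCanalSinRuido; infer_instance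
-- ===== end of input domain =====

-- B replaces A's per-column positive-count check by a permutation test: it collects the column
-- index of every positive entry and checks the sorted index list equals range(num_columnas)
-- (objective: alternative algorithm).

-- ===== PORT A =====
def esCanalSinRuido (matriz_canal : List (List Int)) : Bool :=
  let num_filas : Int := PySem.List.len matriz_canal
  let num_columnas : Int := PySem.List.len (PySem.List.pyGetD matriz_canal 0 [])
  (PySem.List.pyRange 0 num_columnas 1).foldl
    (fun res j =>
      let conteo_no_cero : Int :=
        (PySem.List.pyRange 0 num_filas 1).foldl
          (fun c i =>
            if PySem.List.pyGetD (PySem.List.pyGetD matriz_canal i []) j 0 > 0 then c + 1 else c)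
          0
      if conteo_no_cero ≠ 1 then false else res)
    true

-- ===== PORT B =====
def esCanalSinRuido_alt (matriz_canal : List (List Int)) : Bool :=
  let num_columnas : Int := PySem.List.len (PySem.List.pyGetD matriz_canal 0 [])
  let posiciones : List Int :=
    matriz_canal.flatMap (fun fila =>
      (PySem.List.pyRange 0 num_columnas 1).filter (fun j => PySem.List.pyGetD fila j 0 > 0))
  PySem.List.sorted posiciones (fun x => x) false == PySem.List.pyRange 0 num_columnas 1

-- ===== PRECONDITION & SPEC =====
-- Pre_ excludes exactly the inputs where Python A raises IndexError: the empty matrix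
-- (matriz_canal[0]) and ragged matrices with a row shorter than the first row.
def Pre_esCanalSinRuido (matriz_canal : List (List Int)) : Prop :=
  matriz_canal ≠ [] ∧ ∀ fila ∈ matriz_canal, (matriz_canal.headD []).length ≤ fila.length
instance (matriz_canal : List (List Int)) : Decidable (Pre_esCanalSinRuido matriz_canal) := by
  unfold Pre_esCanalSinRuido; infer_instance
def pvWitness_esCanalSinRuido : List (List Int) := [[1, 0], [0, 2]]

def Spec_esCanalSinRuido (matriz_canal : List (List Int)) (out : Bool) : Prop :=
  out = esCanalSinRuido_alt matriz_canal
instance (matriz_canal : List (List Int)) (out : Bool) : Decidable (Spec_esCanalSinRuido matriz_canal out) := by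
  unfold Spec_esCanalSinRuido; infer_instance

-- ===== CLAIM =====
def Claim_equal_esCanalSinRuido : Prop :=
  ∀ (matriz_canal : List (List Int)), Dom_esCanalSinRuido matriz_canal →
    Pre_esCanalSinRuido matriz_canal →
    Spec_esCanalSinRuido matriz_canal (esCanalSinRuido matriz_canal)

-- ===== LEMMAS AND PROOFS =====

lemma getD_zero_headD (m : List (List Int)) : PySem.List.pyGetD m 0 [] = m.headD [] := by
  cases m <;> simp [PySem.List.pyGetD, PySem.List.pyGet?, PySem.List.pyIdx?]

lemma foldl_if_count (l : List (List Int)) (p : List Int → Prop) [DecidablePred p] (c : Int) :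
    l.foldl (fun c x => if p x then c + 1 else c) c = c + (l.countP (fun x => decide (p x)) : Int) := by
  induction l generalizing c with
  | nil => simp
  | cons x t ih =>
      simp only [List.foldl_cons, List.countP_cons, ih]
      by_cases h : p x
      · simp [h]; omega
      · simp [h]

lemma foldl_flag (l : List Int) (q : Int → Prop) [DecidablePred q] (r : Bool) :
    l.foldl (fun res j => if q j then false else res) r = (r && l.all (fun j => !decide (q j))) := by
  induction l generalizing r with
  | nil => simp
  | cons x t ih =>
      rw [List.foldl_cons, ih]
      by_cases h : q x <;> simp [h]

lemma range_cast_nodup (n : Nat) : ((List.range n).map (fun k : Nat => (k : Int))).Nodup :=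
  (List.nodup_range).map (fun a b h => by exact_mod_cast h)

lemma range_cast_pairwise_lt (n : Nat) :
    ((List.range n).map (fun k : Nat => (k : Int))).Pairwise (fun a b => a < b) :=
  (List.pairwise_lt_range (n := n)).map _ (fun {a b} h => by exact_mod_cast h)

lemma count_flatMap_filter (m : List (List Int)) (rangeL : List Int) (hnd : rangeL.Nodup)
    (j : Int) (hj : j ∈ rangeL) :
    (m.flatMap (fun fila => rangeL.filter (fun j' => PySem.List.pyGetD fila j' 0 > 0))).count j
      = m.countP (fun fila => decide (PySem.List.pyGetD fila j 0 > 0)) := by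
  induction m with
  | nil => simp
  | cons fila rest ih =>
      rw [List.flatMap_cons, List.count_append, ih, List.countP_cons]
      by_cases h : PySem.List.pyGetD fila j 0 > 0
      · rw [List.count_filter (by simpa using h), List.count_eq_one_of_mem hnd hj]
        simp [h]; omega
      · rw [List.count_eq_zero_of_not_mem (by simp [List.mem_filter, h])]
        simp [h]

lemma mem_flatMap_filter (m : List (List Int)) (rangeL : List Int) (x : Int)
    (hx : x ∈ m.flatMap (fun fila => rangeL.filter (fun j' => PySem.List.pyGetD fila j' 0 > 0))) :
    x ∈ rangeL := by
  simp only [List.mem_flatMap, List.mem_filter] at hx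
  obtain ⟨_, _, hmem, _⟩ := hx
  exact hmem

theorem esCanalSinRuido_spec : Claim_equal_esCanalSinRuido := by
  intro m _ hpre
  unfold Spec_esCanalSinRuido esCanalSinRuido esCanalSinRuido_alt
  simp only [getD_zero_headD]
  set n := (m.headD []).length with hn
  have hlen : PySem.List.len (m.headD []) = ((n : Nat) : Int) := by simp [hn]
  rw [hlen, PySem.List.pyRange_zero_nat n]
  set rangeL : List Int := (List.range n).map (fun k : Nat => (k : Int)) with hr
  set ps : List Int :=
    m.flatMap (fun fila => rangeL.filter (fun j' => PySem.List.pyGetD fila j' 0 > 0)) with hps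
  -- A's inner loop counts the rows with a positive entry in column j
  have hinner : ∀ j : Int,
      (PySem.List.pyRange 0 (PySem.List.len m) 1).foldl
        (fun c i => if PySem.List.pyGetD (PySem.List.pyGetD m i []) j 0 > 0 then c + 1 else c) (0 : Int)
      = (m.countP (fun fila => decide (PySem.List.pyGetD fila j 0 > 0)) : Int) := by
    intro j
    rw [PySem.List.foldl_pyRange_zero_pyGetD m []
        (fun c fila => if PySem.List.pyGetD fila j 0 > 0 then c + 1 else c) 0]
    rw [foldl_if_count]
    simp
  simp only [hinner]
  rw [foldl_flag]
  rw [Bool.eq_iff_iff]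
  simp only [Bool.true_and, List.all_eq_true, Bool.not_eq_eq_eq_not, Bool.not_true,
    decide_eq_false_iff_not, not_not, beq_iff_eq]
  have hnd : rangeL.Nodup := range_cast_nodup n
  constructor
  · -- each column count is 1 → sorted positions = rangeL
    intro hall
    have hperm : rangeL.Perm ps := by
      rw [List.perm_iff_count]
      intro x
      by_cases hx : x ∈ rangeL
      · rw [List.count_eq_one_of_mem hnd hx, hps, count_flatMap_filter m rangeL hnd x hx]
        have := hall x hx
        omega
      · rw [List.count_eq_zero_of_not_mem hx, List.count_eq_zero_of_not_mem
            (fun hmem => hx (mem_flatMap_filter m rangeL x hmem))]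
    exact PySem.List.sorted_eq_of_perm_of_pairwise_lt ps rangeL (fun x => x) hperm (range_cast_pairwise_lt n)
  · -- sorted positions = rangeL → each column count is 1
    intro hsort j hj
    have hperm : ps.Perm rangeL := by
      have h1 : (PySem.List.sorted ps (fun x => x) false).Perm ps := PySem.List.sorted_perm ps _ _
      exact (h1.symm.trans (hsort ▸ List.Perm.refl rangeL))
    have hc := (List.perm_iff_count.mp hperm) j
    rw [List.count_eq_one_of_mem hnd hj, hps, count_flatMap_filter m rangeL hnd j hj] at hc
    omega
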